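-- pv_equiv track=rewrite | github.com/hfarooqui98/tennis-scorer | proj1.tiebreakscorer.py | comp101_tiebreaker
-- ===== SOURCE A (Python) =====
-- def comp101_tiebreaker(points, server):
--     '''Takes a list of points and the server whos serving and
--     returns the score, winner(if any), extra points(if any)'''
--     score = 0
--     winner = None
--     remainder = []
--     iter_points = points.copy()  # copy points to itterate on without mutation
--     plyr0scr = 0  # Player 0's running total
--     plyr1scr = 0  # Player 1's running total
--
--     # Checking if unstarted game
--     if len(points) == 0:
--         return ('0-0', None, [])
--
--     # Adding score for plyr0 or plyr1 till one wins, assigning rest to remainder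
--     for count in points:
--         if count == 0:
--             plyr0scr += 1
--         else:
--             plyr1scr += 1
--         iter_points.pop(0)
--
--         # Checking to break count if minimum winning score achieved
--         if (plyr0scr >= 7) or (plyr1scr >= 7):
--             if plyr1scr <= (plyr0scr-2):
--                 break
--             elif plyr0scr <= (plyr1scr-2):
--                 break
--         remainder = iter_points
--
--     # Checking whose score should print first
--     score0 = ('{}-{}').format(plyr0scr, plyr1scr)
--     score1 = ('{}-{}').format(plyr1scr, plyr0scr)
--     if server == 0:
--         score = score0
--     else:
--         score = score1
--
--     # Checking for winner
--     if (plyr0scr >= 7) or (plyr1scr >= 7):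
--         if plyr1scr <= (plyr0scr-2):
--             winner = 0
--         elif plyr0scr <= (plyr1scr-2):
--             winner = 1
--         else:
--             winner = None
--     else:
--         winner = None
--     return (score, winner, remainder)
-- ===== SOURCE B (Python) =====
-- def comp101_tiebreaker(points, server):
--     '''One pass over enumerate(points): count points, stop at the winning point, slice the rest.'''
--     if len(points) == 0:
--         return ('0-0', None, [])
--     p0 = p1 = 0
--     winner = None
--     remainder = []
--     for i, pt in enumerate(points):
--         if pt == 0:
--             p0 += 1
--         else:
--             p1 += 1
--         if max(p0, p1) >= 7 and abs(p0 - p1) >= 2: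
--             winner = 0 if p0 > p1 else 1
--             remainder = points[i + 1:]
--             break
--     score = '{}-{}'.format(p0, p1) if server == 0 else '{}-{}'.format(p1, p0)
--     return (score, winner, remainder)
-- ===== Notes on version B (the rewrite author's own statement) =====
-- stated objective: alternative
-- what changed: Replaces A's loop that pops the front of a copied list on every point (and re-derives the winner after the loop) with a single enumerate pass that keeps the two counts, decides the winner at the winning point, and takes the remainder as one slice points[i+1:].
import Mathlib
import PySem

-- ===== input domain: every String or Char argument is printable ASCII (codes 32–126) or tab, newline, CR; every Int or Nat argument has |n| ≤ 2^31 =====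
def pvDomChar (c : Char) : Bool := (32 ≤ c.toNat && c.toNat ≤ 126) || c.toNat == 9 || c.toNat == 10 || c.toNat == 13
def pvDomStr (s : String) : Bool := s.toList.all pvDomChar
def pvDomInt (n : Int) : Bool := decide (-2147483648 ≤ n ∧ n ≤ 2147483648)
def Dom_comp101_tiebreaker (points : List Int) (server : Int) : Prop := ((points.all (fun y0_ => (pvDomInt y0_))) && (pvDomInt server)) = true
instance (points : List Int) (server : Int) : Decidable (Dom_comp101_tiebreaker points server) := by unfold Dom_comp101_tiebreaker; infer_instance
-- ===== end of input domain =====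

-- B replaces A's pop(0)-per-point loop and post-loop winner re-derivation by one enumerate pass with a final slice (objective: alternative).

-- ===== PORT A =====
-- A's loop state: the (aliased) iter_points list, the two running scores, and whether
-- 'remainder = iter_points' has executed at least once (Python aliasing: once assigned,
-- remainder IS iter_points, so at the end remainder equals the final iter_points).
def comp101_aLoop : List Int → List Int → Int → Int → Bool → (List Int × Int × Int × Bool)
  | [], iter, p0, p1, assigned => (iter, p0, p1, assigned)
  | c :: rest, iter, p0, p1, assigned =>
    let p0' := if c = 0 then p0 + 1 else p0
    let p1' := if c = 0 then p1 else p1 + 1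
    let iter' := iter.drop 1      -- iter_points.pop(0): iter is nonempty whenever A pops, so drop 1 is exact
    if (7 ≤ p0' ∨ 7 ≤ p1') ∧ (p1' ≤ p0' - 2 ∨ p0' ≤ p1' - 2) then
      (iter', p0', p1', assigned)
    else
      comp101_aLoop rest iter' p0' p1' true

def comp101_tiebreaker (points : List Int) (server : Int) : String × Option Int × List Int :=
  if points.length = 0 then ("0-0", none, [])
  else
    let r := comp101_aLoop points points 0 0 false
    let p0 := r.2.1
    let p1 := r.2.2.1
    let remainder := if r.2.2.2 then r.1 else []
    let score0 := PySem.Int.toStr p0 ++ "-" ++ PySem.Int.toStr p1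
    let score1 := PySem.Int.toStr p1 ++ "-" ++ PySem.Int.toStr p0
    let score := if server = 0 then score0 else score1
    let winner : Option Int :=
      if (7 ≤ p0 ∨ 7 ≤ p1) then
        if p1 ≤ p0 - 2 then some 0
        else if p0 ≤ p1 - 2 then some 1
        else none
      else none
    (score, winner, remainder)

-- ===== PORT B =====
-- B's loop: enumerate(points) with running counts; on the winning point return
-- the winner and points[i+1:] (index i ≥ 0, so the slice is List.drop (i+1), exact).
def comp101_bLoop (points : List Int) : List Int → Nat → Int → Int → (Option Int × List Int × Int × Int)
  | [], _, p0, p1 => (none, [], p0, p1)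
  | pt :: rest, i, p0, p1 =>
    let p0' := if pt = 0 then p0 + 1 else p0
    let p1' := if pt = 0 then p1 else p1 + 1
    if 7 ≤ max p0' p1' ∧ 2 ≤ (p0' - p1').natAbs then
      (some (if p0' > p1' then 0 else 1), points.drop (i + 1), p0', p1')
    else
      comp101_bLoop points rest (i + 1) p0' p1'

def comp101_tiebreaker_alt (points : List Int) (server : Int) : String × Option Int × List Int :=
  if points.length = 0 then ("0-0", none, [])
  else
    let r := comp101_bLoop points points 0 0 0
    let p0 := r.2.2.1
    let p1 := r.2.2.2
    let score := if server = 0 then PySem.Int.toStr p0 ++ "-" ++ PySem.Int.toStr p1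
                 else PySem.Int.toStr p1 ++ "-" ++ PySem.Int.toStr p0
    (score, r.1, r.2.1)

-- ===== PRECONDITION & SPEC =====
def Spec_comp101_tiebreaker (points : List Int) (server : Int) (out : String × Option Int × List Int) : Prop := out = comp101_tiebreaker_alt points server
instance (points : List Int) (server : Int) (out : String × Option Int × List Int) : Decidable (Spec_comp101_tiebreaker points server out) := by unfold Spec_comp101_tiebreaker; infer_instance

-- ===== CLAIM (what is proved, stated in full; the proofs are below) =====
def Claim_equal_comp101_tiebreaker : Prop := ∀ (points : List Int) (server : Int), Dom_comp101_tiebreaker points server → Spec_comp101_tiebreaker points server (comp101_tiebreaker points server)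

-- ===== LEMMAS AND PROOFS =====

-- A's end-of-function winner computation, as a function of the final scores.
def comp101_winnerOf (p0 p1 : Int) : Option Int :=
  if (7 ≤ p0 ∨ 7 ≤ p1) then
    if p1 ≤ p0 - 2 then some 0
    else if p0 ≤ p1 - 2 then some 1
    else none
  else none

-- Once the 'assigned' flag is true it stays true.
theorem comp101_aLoop_assigned (rest : List Int) : ∀ (iter : List Int) (p0 p1 : Int),
    (comp101_aLoop rest iter p0 p1 true).2.2.2 = true := by
  induction rest with
  | nil => intro iter p0 p1; rfl
  | cons c rest ih =>
    intro iter p0 p1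
    simp only [comp101_aLoop]
    split <;> split <;> first | rfl | exact ih _ _ _

-- The two loops agree, given that the break condition does not hold on entry
-- and that rest is the suffix of points starting at index i.
theorem comp101_loop_eq (rest : List Int) : ∀ (pts : List Int) (i : Nat) (p0 p1 : Int),
    pts.drop i = rest →
    ¬ ((7 ≤ p0 ∨ 7 ≤ p1) ∧ (p1 ≤ p0 - 2 ∨ p0 ≤ p1 - 2)) →
    comp101_bLoop pts rest i p0 p1 =
      (comp101_winnerOf (comp101_aLoop rest rest p0 p1 true).2.1 (comp101_aLoop rest rest p0 p1 true).2.2.1,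
       (comp101_aLoop rest rest p0 p1 true).1,
       (comp101_aLoop rest rest p0 p1 true).2.1,
       (comp101_aLoop rest rest p0 p1 true).2.2.1) := by
  induction rest with
  | nil =>
    intro pts i p0 p1 _ hnc
    simp only [comp101_bLoop, comp101_aLoop, comp101_winnerOf]
    split
    · next h =>
      split
      · next h2 => exact absurd ⟨h, Or.inl h2⟩ hnc
      · split
        · next h3 => exact absurd ⟨h, Or.inr h3⟩ hnc
        · rfl
    · rfl
  | cons c rest ih =>
    intro pts i p0 p1 hdrop hnc
    simp only [comp101_bLoop, comp101_aLoop]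
    have hdrop' : pts.drop (i + 1) = rest := by
      have h1 : (pts.drop i).drop 1 = rest := by rw [hdrop]; rfl
      rwa [List.drop_drop] at h1
    by_cases hb : 7 ≤ max (if c = 0 then p0 + 1 else p0) (if c = 0 then p1 else p1 + 1) ∧
        2 ≤ ((if c = 0 then p0 + 1 else p0) - (if c = 0 then p1 else p1 + 1)).natAbs
    · have ha : (7 ≤ (if c = 0 then p0 + 1 else p0) ∨ 7 ≤ (if c = 0 then p1 else p1 + 1)) ∧
          ((if c = 0 then p1 else p1 + 1) ≤ (if c = 0 then p0 + 1 else p0) - 2 ∨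
           (if c = 0 then p0 + 1 else p0) ≤ (if c = 0 then p1 else p1 + 1) - 2) := by
        rcases hb with ⟨h1, h2⟩
        constructor <;> [skip; skip] <;> split_ifs at * <;> omega
      rw [if_pos hb, if_pos ha]
      simp only [comp101_winnerOf, hdrop']
      rcases hb with ⟨h1, h2⟩
      split_ifs <;> first | rfl | omega
    · have ha : ¬ ((7 ≤ (if c = 0 then p0 + 1 else p0) ∨ 7 ≤ (if c = 0 then p1 else p1 + 1)) ∧
          ((if c = 0 then p1 else p1 + 1) ≤ (if c = 0 then p0 + 1 else p0) - 2 ∨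
           (if c = 0 then p0 + 1 else p0) ≤ (if c = 0 then p1 else p1 + 1) - 2)) := by
        intro h; apply hb; rcases h with ⟨h1, h2⟩
        constructor <;> [skip; skip] <;> split_ifs at * <;> omega
      rw [if_neg hb, if_neg ha]
      have : (c :: rest).drop 1 = rest := rfl
      rw [this]
      exact ih pts (i + 1) _ _ hdrop' ha

-- ===== VERDICT (by name: the statement is the Claim_ definition above) =====
theorem comp101_tiebreaker_spec : Claim_equal_comp101_tiebreaker := by
  intro points server _
  unfold Spec_comp101_tiebreaker
  cases points with
  | nil => rfl
  | cons c rest =>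
    unfold comp101_tiebreaker comp101_tiebreaker_alt
    simp only [List.length_cons, Nat.succ_ne_zero]
    -- one step of each loop: the first point can never end the tiebreak (scores ≤ 1)
    have hA : comp101_aLoop (c :: rest) (c :: rest) 0 0 false =
        comp101_aLoop rest rest (if c = 0 then 0 + 1 else 0) (if c = 0 then 0 else 0 + 1) true := by
      simp only [comp101_aLoop]
      rw [if_neg (by split_ifs <;> omega)]
      rfl
    have hB : comp101_bLoop (c :: rest) (c :: rest) 0 0 0 =
        comp101_bLoop (c :: rest) rest 1 (if c = 0 then 0 + 1 else 0) (if c = 0 then 0 else 0 + 1) := by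
      simp only [comp101_bLoop]
      rw [if_neg (by split_ifs <;> omega)]
    rw [hA, hB, comp101_loop_eq rest (c :: rest) 1 _ _ rfl (by split_ifs <;> omega)]
    simp only [comp101_aLoop_assigned, if_pos, comp101_winnerOf]
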